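-- pv_equiv track=rewrite | github.com/PabloPalaciosAlonso/Square-wave-fitter | TVD.py | getParamsOfSquareWave
-- ===== SOURCE A (Python) =====
-- def getParamsOfSquareWave(intensities, baseline, dI):
--     params = []
--     params+=[baseline, dI]
--     lastInt = baseline
--     for i in range(len(intensities)):
--         newInt = intensities[i]
--         if newInt>lastInt: # New jump
--             params+=[i]
--         elif newInt<lastInt:
--             params+=[i-params[-1]]
--         lastInt = newInt
--     return params
-- ===== SOURCE B (Python) =====
-- def getParamsOfSquareWave(intensities, baseline, dI):
--     # Pass 1: detect transition events (index, direction) against the previous value.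
--     events = []
--     prev_val = baseline
--     for i, v in enumerate(intensities):
--         if v > prev_val:
--             events.append((i, 1))
--         elif v < prev_val:
--             events.append((i, -1))
--         prev_val = v
--     # Pass 2: accumulate parameters from the events.
--     params = [baseline, dI]
--     prev = dI
--     for i, sign in events:
--         if sign == 1:
--             params.append(i)
--             prev = i
--         else:
--             w = i - prev
--             params.append(w)
--             prev = w
--     return params
-- ===== Notes on version B (the rewrite author's own statement) =====
-- stated objective: alternative
-- what changed: Single index-loop that reads params[-1] is split into a detect pass producing (index, direction) transition events and an accumulate pass carrying a scalar prev instead of indexing the output list.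
import Mathlib
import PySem

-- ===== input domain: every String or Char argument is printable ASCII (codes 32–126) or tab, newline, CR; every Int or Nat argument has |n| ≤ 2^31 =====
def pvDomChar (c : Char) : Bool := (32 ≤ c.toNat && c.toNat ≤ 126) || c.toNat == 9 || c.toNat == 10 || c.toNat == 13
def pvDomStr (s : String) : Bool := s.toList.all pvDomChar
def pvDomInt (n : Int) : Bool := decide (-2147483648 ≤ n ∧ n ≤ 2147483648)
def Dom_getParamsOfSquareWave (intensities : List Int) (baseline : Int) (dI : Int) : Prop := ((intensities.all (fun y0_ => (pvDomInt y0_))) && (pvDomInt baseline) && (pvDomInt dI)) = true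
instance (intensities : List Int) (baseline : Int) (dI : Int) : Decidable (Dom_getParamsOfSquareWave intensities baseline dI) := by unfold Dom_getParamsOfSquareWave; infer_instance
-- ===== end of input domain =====

-- B replaces A's single index-loop (which reads params[-1]) by a detect-events pass plus an
-- accumulate pass carrying a scalar prev; objective: alternative decomposition, same cost.

-- ===== PORT A =====
-- loop body of A (params/lastInt state; i the loop index, newInt = intensities[i])
def pvStepA (st : List Int × Int) (i : Int) (newInt : Int) : List Int × Int :=
  if newInt > st.2 then (st.1 ++ [i], newInt)
  else if newInt < st.2 then (st.1 ++ [i - PySem.List.pyGetD st.1 (-1) 0], newInt)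
  else (st.1, newInt)

def getParamsOfSquareWave (intensities : List Int) (baseline : Int) (dI : Int) : List Int :=
  let params : List Int := []
  let params := params ++ [baseline, dI]
  ((PySem.List.pyRange 0 (intensities.length) 1).foldl
      (fun st i => pvStepA st i (PySem.List.pyGetD intensities i 0))
      (params, baseline)).1

-- ===== PORT B =====
-- pass-1 body: record a transition event against the previous value
def pvStepEv (st : List (Int × Int) × Int) (p : Int × Int) : List (Int × Int) × Int :=
  if p.2 > st.2 then (st.1 ++ [(p.1, 1)], p.2)
  else if p.2 < st.2 then (st.1 ++ [(p.1, -1)], p.2)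
  else (st.1, p.2)

-- pass-2 body: append a jump position or width, tracking the last appended value in prev
def pvStepAcc (st : List Int × Int) (e : Int × Int) : List Int × Int :=
  if e.2 = 1 then (st.1 ++ [e.1], e.1)
  else (st.1 ++ [e.1 - st.2], e.1 - st.2)

def getParamsOfSquareWave_alt (intensities : List Int) (baseline : Int) (dI : Int) : List Int :=
  let events := ((PySem.List.enumerate intensities 0).foldl pvStepEv ([], baseline)).1
  (events.foldl pvStepAcc ([baseline, dI], dI)).1

-- ===== PRECONDITION & SPEC =====
def Spec_getParamsOfSquareWave (intensities : List Int) (baseline : Int) (dI : Int) (out : List Int) : Prop := out = getParamsOfSquareWave_alt intensities baseline dI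
instance (intensities : List Int) (baseline : Int) (dI : Int) (out : List Int) : Decidable (Spec_getParamsOfSquareWave intensities baseline dI out) := by unfold Spec_getParamsOfSquareWave; infer_instance

-- ===== CLAIM (what is proved, stated in full; the proofs are below) =====
def Claim_equal_getParamsOfSquareWave : Prop := ∀ (intensities : List Int) (baseline : Int) (dI : Int), Dom_getParamsOfSquareWave intensities baseline dI → Spec_getParamsOfSquareWave intensities baseline dI (getParamsOfSquareWave intensities baseline dI)

-- ===== LEMMAS AND PROOFS =====

-- recursive characterisations used only by the proofs
def pvEvRec : List (Int × Int) → Int → List (Int × Int)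
  | [], _ => []
  | p :: rest, last =>
    if p.2 > last then (p.1, 1) :: pvEvRec rest p.2
    else if p.2 < last then (p.1, -1) :: pvEvRec rest p.2
    else pvEvRec rest p.2

def pvAccRec : List (Int × Int) → Int → List Int
  | [], _ => []
  | e :: rest, prev =>
    if e.2 = 1 then e.1 :: pvAccRec rest e.1
    else (e.1 - prev) :: pvAccRec rest (e.1 - prev)

theorem pvEv_foldl : ∀ (l : List (Int × Int)) (acc : List (Int × Int)) (last : Int),
    (l.foldl pvStepEv (acc, last)).1 = acc ++ pvEvRec l last := by
  intro l
  induction l with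
  | nil => intro acc last; simp [pvEvRec]
  | cons p rest ih =>
    intro acc last
    simp only [List.foldl_cons, pvStepEv, pvEvRec]
    split_ifs with h1 h2 <;> simp [ih]

theorem pvAcc_foldl : ∀ (evs : List (Int × Int)) (params : List Int) (prev : Int),
    (evs.foldl pvStepAcc (params, prev)).1 = params ++ pvAccRec evs prev := by
  intro evs
  induction evs with
  | nil => intro params prev; simp [pvAccRec]
  | cons e rest ih =>
    intro params prev
    simp only [List.foldl_cons, pvStepAcc, pvAccRec]
    split_ifs with h1 <;> simp [ih]

-- A's loop over enumerate equals concatenating the accumulated events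
theorem pvMain : ∀ (l : List (Int × Int)) (params : List Int) (last prev : Int),
    params ≠ [] → PySem.List.pyGetD params (-1) 0 = prev →
    (l.foldl (fun st p => pvStepA st p.1 p.2) (params, last)).1
      = params ++ pvAccRec (pvEvRec l last) prev := by
  intro l
  induction l with
  | nil => intro params last prev _ _; simp [pvEvRec, pvAccRec]
  | cons p rest ih =>
    intro params last prev hne hprev
    rw [List.foldl_cons]
    by_cases h1 : p.2 > last
    · have hstep : pvStepA (params, last) p.1 p.2 = (params ++ [p.1], p.2) := by
        simp [pvStepA, h1]
      rw [hstep, ih (params ++ [p.1]) p.2 p.1 (by simp)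
            (PySem.List.pyGetD_neg_one_append_singleton params p.1 0)]
      simp [pvEvRec, pvAccRec, h1]
    · by_cases h2 : p.2 < last
      · have hstep : pvStepA (params, last) p.1 p.2 = (params ++ [p.1 - prev], p.2) := by
          simp [pvStepA, h1, h2, hprev]
        rw [hstep, ih (params ++ [p.1 - prev]) p.2 (p.1 - prev) (by simp)
              (PySem.List.pyGetD_neg_one_append_singleton params (p.1 - prev) 0)]
        simp [pvEvRec, pvAccRec, h1, h2]
      · have hstep : pvStepA (params, last) p.1 p.2 = (params, p.2) := by
          simp [pvStepA, h1, h2]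
        rw [hstep, ih params p.2 prev hne hprev]
        simp [pvEvRec, h1, h2]

-- bridge: A's 'for i in range(len(xs)): xs[i]' loop as a fold over enumerate
theorem pvBridge {β : Type} (f : β → Int → Int → β) (d : Int) :
    ∀ (xs : List Int) (s : Nat) (init : β),
    (PySem.List.pyRange (s : Int) ((s : Int) + xs.length) 1).foldl
        (fun acc i => f acc i (PySem.List.pyGetD xs (i - (s : Int)) d)) init
      = (PySem.List.enumerate xs (s : Int)).foldl (fun acc q => f acc q.1 q.2) init := by
  intro xs
  induction xs with
  | nil => intro s init; simp [PySem.List.pyRange_one_eq_nil, PySem.List.enumerate]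
  | cons y ys ih =>
    intro s init
    rw [PySem.List.pyRange_one_cons (by push_cast [List.length_cons]; omega)]
    rw [PySem.List.enumerate_cons]
    simp only [List.foldl_cons, sub_self, PySem.List.pyGetD_zero_cons]
    have hcongr : ∀ (acc : β) (i : Int),
        i ∈ PySem.List.pyRange ((s : Int) + 1) ((s : Int) + (y :: ys).length) 1 →
        f acc i (PySem.List.pyGetD (y :: ys) (i - (s : Int)) d)
          = f acc i (PySem.List.pyGetD ys (i - ((s : Int) + 1)) d) := by
      intro acc i hi
      rw [PySem.List.mem_pyRange_one] at hi
      have h2 : i - (s : Int) = (i - ((s : Int) + 1)) + 1 := by ring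
      rw [h2]
      have h0 : 0 ≤ i - ((s : Int) + 1) := by omega
      obtain ⟨k, hk⟩ := Int.eq_ofNat_of_zero_le h0
      rw [hk]
      have : ((k : Int)) + 1 = ((k + 1 : Nat) : Int) := by push_cast; ring
      rw [this, PySem.List.pyGetD_natCast]
      simp
    rw [PySem.List.foldl_congr_mem _ _ _ _ (fun acc i hi => hcongr acc i hi)]
    have hlen : (s : Int) + (y :: ys).length = ((s + 1 : Nat) : Int) + ys.length := by
      simp; omega
    rw [hlen]
    have := ih (s + 1) (f init (s : Int) y)
    simpa using this

-- ===== VERDICT (by name: the statement is the Claim_ definition above) =====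
theorem getParamsOfSquareWave_spec : Claim_equal_getParamsOfSquareWave := by
  intro xs baseline dI _
  unfold Spec_getParamsOfSquareWave getParamsOfSquareWave getParamsOfSquareWave_alt
  simp only []
  have hb := pvBridge (fun st i v => pvStepA st i v) 0 xs 0 (([] : List Int) ++ [baseline, dI], baseline)
  simp only [Nat.cast_zero, zero_add, sub_zero] at hb
  rw [List.nil_append] at hb ⊢
  rw [hb]
  rw [pvMain (PySem.List.enumerate xs 0) [baseline, dI] baseline dI (by simp)
        (PySem.List.pyGetD_neg_one_append_singleton [baseline] dI 0)]
  rw [pvEv_foldl, pvAcc_foldl]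
  simp
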